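-- pv_equiv track=rewrite | github.com/sudo-veer/spcc | python/inter.py | generate
-- ===== SOURCE A (Python) =====
-- ops = {"+": 1, "-": 1, "*": 2, "/": 2, "^": 3}
--
-- def generate(postfix, lhs):
--     st, tac, quads, triples = [], [], [], []
--     for t in postfix:
--         if t not in ops:
--             st.append((t, t))
--             continue
--
--         # Pop the top two elements: b is right operand, a is left operand
--         (b_name, b_ref), (a_name, a_ref) = st.pop(), st.pop()
--         temp = f"t{len(tac) + 1}"
--
--         tac.append(f"{temp} = {a_name} {t} {b_name}")
--         quads.append((len(quads), t, a_name, b_name, temp))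
--         triples.append((len(triples), t, a_ref, b_ref))
--         st.append((temp, f"({len(triples) - 1})"))
--
--     final_name, final_ref = st[0]
--     tac.append(f"{lhs} = {final_name}")
--     quads.append((len(quads), "=", final_name, "-", lhs))
--     triples.append((len(triples), "=", lhs, final_ref))
--     return tac, quads, triples
-- ===== SOURCE B (Python) =====
-- ops = {"+": 1, "-": 1, "*": 2, "/": 2, "^": 3}
--
-- def generate(postfix, lhs):
--     # Pass 1: rebuild the expression forest from the postfix stream.
--     stack = []
--     for t in postfix:
--         if t in ops:
--             r = stack.pop()
--             l = stack.pop()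
--             stack.append((t, l, r))
--         else:
--             stack.append(t)
--
--     tac, quads, triples = [], [], []
--
--     # Pass 2: post-order walk emitting TAC/quads/triples; returns (name, ref).
--     def emit(node):
--         if isinstance(node, str):
--             return node, node
--         op, l, r = node
--         a_name, a_ref = emit(l)
--         b_name, b_ref = emit(r)
--         temp = f"t{len(tac) + 1}"
--         tac.append(f"{temp} = {a_name} {op} {b_name}")
--         quads.append((len(quads), op, a_name, b_name, temp))
--         triples.append((len(triples), op, a_ref, b_ref))
--         return temp, f"({len(triples) - 1})"
--
--     results = [emit(n) for n in stack]
--     final_name, final_ref = results[0]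
--     tac.append(f"{lhs} = {final_name}")
--     quads.append((len(quads), "=", final_name, "-", lhs))
--     triples.append((len(triples), "=", lhs, final_ref))
--     return tac, quads, triples
-- ===== Notes on version B (the rewrite author's own statement) =====
-- stated objective: alternative
-- what changed: B first reconstructs an explicit expression forest from the postfix stream and then emits the TAC/quads/triples by a recursive post-order walk threading the accumulators, instead of A's single pass over a stack of (name, ref) string pairs.
import Mathlib
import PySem

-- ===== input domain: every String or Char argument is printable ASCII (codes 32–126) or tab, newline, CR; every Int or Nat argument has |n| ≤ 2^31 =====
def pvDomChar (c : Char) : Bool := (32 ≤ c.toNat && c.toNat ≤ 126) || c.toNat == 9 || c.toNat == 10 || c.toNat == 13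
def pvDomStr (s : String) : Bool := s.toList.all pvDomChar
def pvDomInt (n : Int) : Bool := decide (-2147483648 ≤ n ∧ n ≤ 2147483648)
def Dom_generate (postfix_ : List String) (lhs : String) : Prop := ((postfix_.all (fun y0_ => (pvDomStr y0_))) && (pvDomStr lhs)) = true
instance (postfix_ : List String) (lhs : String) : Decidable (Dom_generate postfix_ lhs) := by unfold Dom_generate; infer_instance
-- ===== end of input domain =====

-- B rebuilds an expression forest and emits code by a recursive post-order walk,
-- instead of A's single pass that threads a stack of (name, ref) string pairs.
-- Objective: alternative decomposition (same asymptotic cost).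

-- ===== PORT A =====
-- the module-level dict `ops` (only key membership is ever used)
def interOps : List (String × Int) := [("+", 1), ("-", 1), ("*", 2), ("/", 2), ("^", 3)]
-- `t in ops`
def isOp (t : String) : Bool := (interOps.lookup t).isSome

abbrev PVQuad := Int × String × String × String × String
abbrev PVTrip := Int × String × String × String
-- loop state of A: (st, tac, quads, triples); st is Python's stack stored TOP-FIRST
abbrev PVAState := List (String × String) × List String × List PVQuad × List PVTrip

-- one iteration of A's for-loop
def stepA (s : PVAState) (t : String) : PVAState :=
  if isOp t then
    match s with
    | ((bn, br) :: (an, ar) :: rest, tac, quads, triples) =>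
      let temp := "t" ++ PySem.Int.toStr ((tac.length : Int) + 1)
      ((temp, "(" ++ PySem.Int.toStr ((triples.length : Int)) ++ ")") :: rest,
       tac ++ [temp ++ " = " ++ an ++ " " ++ t ++ " " ++ bn],
       quads ++ [((quads.length : Int), t, an, bn, temp)],
       triples ++ [((triples.length : Int), t, ar, br)])
    | _ => s   -- Python raises IndexError (st.pop on <2 elements); excluded by Pre_
  else
    match s with
    | (st, tac, quads, triples) => ((t, t) :: st, tac, quads, triples)

def generate (postfix_ : List String) (lhs : String) : List String × (List (Int × String × String × String × String)) × (List (Int × String × String × String)) :=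
  match postfix_.foldl stepA ([], [], [], []) with
  | (st, tac, quads, triples) =>
    match st.getLast? with   -- st[0] in Python order (stack is stored top-first)
    | some (fn, fr) =>
      (tac ++ [lhs ++ " = " ++ fn],
       quads ++ [((quads.length : Int), "=", fn, "-", lhs)],
       triples ++ [((triples.length : Int), "=", lhs, fr)])
    | none => ([], [], [])   -- Python raises IndexError (st[0] on empty); excluded by Pre_

-- ===== PORT B =====
-- expression tree: a leaf is an operand token, a node is (operator, left, right)
inductive ETree where
  | leaf : String → ETree
  | node : String → ETree → ETree → ETree
deriving DecidableEq, Repr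

-- pass 1: one iteration of the forest-building loop (stack stored TOP-FIRST)
def buildStep (stk : List ETree) (t : String) : List ETree :=
  if isOp t then
    match stk with
    | r :: l :: rest => ETree.node t l r :: rest
    | _ => stk       -- Python raises IndexError here; excluded by Pre_
  else ETree.leaf t :: stk

-- accumulator threaded by emit: (tac, quads, triples)
abbrev PVAcc := List String × List PVQuad × List PVTrip

-- pass 2: post-order emission; returns ((name, ref), updated accumulator)
def emitTree : ETree → PVAcc → (String × String) × PVAcc
  | ETree.leaf t, acc => ((t, t), acc)
  | ETree.node op l r, acc =>
    let pa := emitTree l acc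
    let pb := emitTree r pa.2
    match pb.2, pa.1, pb.1 with
    | (tac, quads, triples), (an, ar), (bn, br) =>
      let temp := "t" ++ PySem.Int.toStr ((tac.length : Int) + 1)
      ((temp, "(" ++ PySem.Int.toStr ((triples.length : Int)) ++ ")"),
       (tac ++ [temp ++ " = " ++ an ++ " " ++ op ++ " " ++ bn],
        quads ++ [((quads.length : Int), op, an, bn, temp)],
        triples ++ [((triples.length : Int), op, ar, br)]))

-- `[emit(n) for n in stack]` threading the accumulator
def emitList : List ETree → PVAcc → List (String × String) × PVAcc
  | [], acc => ([], acc)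
  | t :: ts, acc =>
    let p := emitTree t acc
    let ps := emitList ts p.2
    (p.1 :: ps.1, ps.2)

def generate_alt (postfix_ : List String) (lhs : String) : List String × (List (Int × String × String × String × String)) × (List (Int × String × String × String)) :=
  let forest := postfix_.foldl buildStep []      -- top-first; Python order is .reverse
  match emitList forest.reverse ([], [], []) with
  | (results, (tac, quads, triples)) =>
    match results.head? with                     -- results[0]
    | some (fn, fr) =>
      (tac ++ [lhs ++ " = " ++ fn],
       quads ++ [((quads.length : Int), "=", fn, "-", lhs)],
       triples ++ [((triples.length : Int), "=", lhs, fr)])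
    | none => ([], [], [])   -- Python raises IndexError (results[0] on empty); excluded by Pre_

-- ===== PRECONDITION & SPEC =====
-- Pre_ admits exactly the inputs on which the Python A returns normally: a nonempty
-- token list in which every operator finds at least two entries on the stack
-- (stack depth before position i = operands − operators among the first i tokens);
-- elsewhere A raises IndexError.
def Pre_generate (postfix_ : List String) (lhs : String) : Prop :=
  postfix_ ≠ [] ∧
  ∀ i ∈ List.range postfix_.length,
    isOp (postfix_.getD i "") = true →
    ((postfix_.take i).countP isOp) + 2 ≤ ((postfix_.take i).countP (fun t => !isOp t))
instance (postfix_ : List String) (lhs : String) : Decidable (Pre_generate postfix_ lhs) := by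
  unfold Pre_generate; infer_instance

def pvWitness_generate : List String × String := (["a", "b", "+", "c", "*"], "x")

def Spec_generate (postfix_ : List String) (lhs : String) (out : List String × (List (Int × String × String × String × String)) × (List (Int × String × String × String))) : Prop := out = generate_alt postfix_ lhs
instance (postfix_ : List String) (lhs : String) (out : List String × (List (Int × String × String × String × String)) × (List (Int × String × String × String))) : Decidable (Spec_generate postfix_ lhs out) := by
  unfold Spec_generate
  letI i2 : DecidableEq (List (Int × String × String × String × String)) := inferInstance
  letI i3 : DecidableEq (List (Int × String × String × String)) := inferInstance
  letI i23 : DecidableEq (List (Int × String × String × String × String) × List (Int × String × String × String)) := instDecidableEqProd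
  letI : DecidableEq (List String × List (Int × String × String × String × String) × List (Int × String × String × String)) := instDecidableEqProd
  infer_instance

-- ===== CLAIM (what is proved, stated in full; the proofs are below) =====
def Claim_equal_generate : Prop := ∀ (postfix_ : List String) (lhs : String), Dom_generate postfix_ lhs → Pre_generate postfix_ lhs → Spec_generate postfix_ lhs (generate postfix_ lhs)

-- ===== LEMMAS AND PROOFS =====

-- A's loop state obtained by emitting a (top-first) tree stack from the empty accumulator
def stateOf (ts : List ETree) : PVAState :=
  match emitList ts.reverse ([], [], []) with
  | (ps, (tac, quads, triples)) => (ps.reverse, tac, quads, triples)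

theorem emitList_append (xs ys : List ETree) (acc : PVAcc) :
    emitList (xs ++ ys) acc =
      ((emitList xs acc).1 ++ (emitList ys (emitList xs acc).2).1,
       (emitList ys (emitList xs acc).2).2) := by
  induction xs generalizing acc with
  | nil => simp [emitList]
  | cons x xs ih => simp [emitList, ih]

theorem stepA_stateOf (ts : List ETree) (t : String) :
    stepA (stateOf ts) t = stateOf (buildStep ts t) := by
  by_cases h : isOp t = true
  · match ts with
    | [] =>
      simp [stateOf, buildStep, stepA, emitList, h]
    | [x] =>
      cases hx : emitTree x ([], [], []) with
      | mk p acc =>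
        cases p with
        | mk a b =>
          cases acc with
          | mk tac qt => cases qt with
            | mk quads triples =>
              simp [stateOf, buildStep, stepA, emitList, h, hx]
    | r :: l :: rest =>
      simp only [stateOf, buildStep, h, if_pos]
      have h1 : (r :: l :: rest).reverse = rest.reverse ++ [l, r] := by simp
      have h2 : (ETree.node t l r :: rest).reverse = rest.reverse ++ [ETree.node t l r] := by simp
      rw [h1, h2, emitList_append, emitList_append]
      cases hr : emitList rest.reverse ([], [], []) with
      | mk ps acc =>
        simp only [emitList]
        cases hl : emitTree l acc with
        | mk pa acc1 =>
          cases hrr : emitTree r acc1 with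
          | mk pb acc2 =>
            cases acc2 with
            | mk tac qt => cases qt with
              | mk quads triples =>
                cases pa with
                | mk an ar =>
                  cases pb with
                  | mk bn br =>
                    simp [stepA, emitTree, h, hl, hrr]
  · simp only [stateOf, buildStep, h, Bool.false_eq_true, if_false]
    have h1 : (ETree.leaf t :: ts).reverse = ts.reverse ++ [ETree.leaf t] := by simp
    rw [h1, emitList_append]
    cases hr : emitList ts.reverse ([], [], []) with
    | mk ps acc =>
      cases acc with
      | mk tac qt => cases qt with
        | mk quads triples => simp [stepA, emitList, emitTree, h]

theorem foldl_stateOf (toks : List String) (ts : List ETree) :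
    toks.foldl stepA (stateOf ts) = stateOf (toks.foldl buildStep ts) := by
  induction toks generalizing ts with
  | nil => rfl
  | cons t toks ih => simp [List.foldl, stepA_stateOf, ih]

theorem generate_eq_alt (postfix_ : List String) (lhs : String) :
    generate postfix_ lhs = generate_alt postfix_ lhs := by
  have h0 : (([], [], [], []) : PVAState) = stateOf [] := by rfl
  unfold generate generate_alt
  rw [h0, foldl_stateOf]
  cases hf : emitList (postfix_.foldl buildStep []).reverse ([], [], []) with
  | mk ps acc =>
    cases acc with
    | mk tac qt => cases qt with
      | mk quads triples =>
        simp only [stateOf, hf, List.getLast?_reverse]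

-- ===== VERDICT (by name: the statement is the Claim_ definition above) =====
theorem generate_spec : Claim_equal_generate := by
  intro postfix_ lhs _ _
  unfold Spec_generate
  exact generate_eq_alt postfix_ lhs
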